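-- pv_equiv track=rewrite | github.com/caro-marks/CodeSignal---ARCADE | Intro/Python3/Intro/14.py | stringsRearrangement
-- ===== SOURCE A (Python) =====
-- def stringsRearrangement(inputArray):
--     def differsByOne(s1, s2):
--         if len(s1) != len(s2):
--             return False
--         differentChars = 0
--         for i in range(len(s1)):
--             if s1[i] != s2[i]:
--                 differentChars += 1
--         return differentChars == 1
--
--     def isChainPossible(startIndex, array):
--         if len(array) == 1:
--             return True
--         newArray = array[:startIndex] + array[(1 + startIndex):]
--         for i in range(len(newArray)):
--             if differsByOne(array[startIndex], newArray[i]) and \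
--                     isChainPossible(i, newArray):
--                 return True
--         return False
--     for startIndex in range(len(inputArray)):
--         if isChainPossible(startIndex, inputArray):
--             return True
--     return False
-- ===== SOURCE B (Python) =====
-- def stringsRearrangement(inputArray):
--     n = len(inputArray)
--
--     def differs(a, b):
--         return len(a) == len(b) and sum(x != y for x, y in zip(a, b)) == 1
--
--     adj = [[differs(a, b) for b in inputArray] for a in inputArray]
--     full = (1 << n) - 1
--     seen = set()
--
--     def dfs(last, mask):
--         if mask == full:
--             return True
--         for j in range(n):
--             bit = 1 << j
--             if not mask & bit and adj[last][j] and (mask | bit, j) not in seen: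
--                 seen.add((mask | bit, j))
--                 if dfs(j, mask | bit):
--                     return True
--         return False
--
--     return any(dfs(i, 1 << i) for i in range(n))
-- ===== Notes on version B (the rewrite author's own statement) =====
-- stated objective: alternative
-- what changed: Replaces A's factorial-time backtracking over shrinking sublists (rebuilding the list at every step) by a memoized bitmask DFS over (visited-set, last-index) states with a precomputed adjacency matrix, deciding Hamiltonian-path existence in the differs-by-one graph; both remain exponential in the worst case, so no speed is claimed.
import Mathlib
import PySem

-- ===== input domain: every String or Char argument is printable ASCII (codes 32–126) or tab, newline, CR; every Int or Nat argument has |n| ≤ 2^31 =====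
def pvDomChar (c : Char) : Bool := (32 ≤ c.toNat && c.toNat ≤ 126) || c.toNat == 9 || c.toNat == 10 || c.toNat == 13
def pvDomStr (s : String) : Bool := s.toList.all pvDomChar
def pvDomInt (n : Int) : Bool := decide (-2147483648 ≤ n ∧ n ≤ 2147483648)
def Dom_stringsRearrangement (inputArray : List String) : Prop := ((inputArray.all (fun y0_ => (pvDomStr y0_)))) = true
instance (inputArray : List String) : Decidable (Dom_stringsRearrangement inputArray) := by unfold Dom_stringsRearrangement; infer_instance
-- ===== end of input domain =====

-- B replaces A's factorial backtracking over shrinking sublists by a memoized bitmask DFS over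
-- (visited-set, last-index) states with a precomputed adjacency matrix (alternative algorithm;
-- both remain exponential in the worst case).

-- ===== PORT A =====
-- differsByOne: count differing positions over range(len(s1)) (indices always in range when called)
def pvDiffersByOne (s1 s2 : String) : Bool :=
  if PySem.Str.len s1 != PySem.Str.len s2 then false
  else
    let differentChars : Int :=
      (PySem.List.pyRange 0 (PySem.Str.len s1) 1).foldl
        (fun dc i =>
          if PySem.List.pyGetD s1.toList i ' ' != PySem.List.pyGetD s2.toList i ' ' then dc + 1 else dc) 0
    differentChars == 1

-- isChainPossible; fuel = array length bounds the recursion depth (each call drops one element),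
-- so the fuel-0 branch is unreachable from stringsRearrangement's calls.
def pvIsChainPossible : Nat → Int → List String → Bool
  | 0, _, _ => false
  | fuel+1, startIndex, array =>
    if PySem.List.len array == 1 then true
    else
      let newArray := PySem.List.slice array none (some startIndex) ++
                      PySem.List.slice array (some (1 + startIndex)) none
      (PySem.List.pyRange 0 (PySem.List.len newArray) 1).any
        (fun i => pvDiffersByOne (PySem.List.pyGetD array startIndex "")
                    (PySem.List.pyGetD newArray i "") &&
                  pvIsChainPossible fuel i newArray)

def stringsRearrangement (inputArray : List String) : Bool :=
  (PySem.List.pyRange 0 (PySem.List.len inputArray) 1).any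
    (fun startIndex => pvIsChainPossible inputArray.length startIndex inputArray)

-- ===== PORT B =====
-- differs: len(a)==len(b) and sum(x!=y for x,y in zip(a,b))==1 (the 0/1-sum is the count)
def pvDiffers (a b : String) : Bool :=
  PySem.Str.len a == PySem.Str.len b &&
  ((a.toList.zip b.toList).countP (fun p => p.1 != p.2)) == 1

-- dfs(last, mask) with the memo set threaded through; fuel (= n at the top call) bounds the
-- recursion depth: every recursive call sets one more of the n bits, so fuel never runs out.
mutual
def pvDfs (adj : List (List Bool)) (n full : Nat) (fuel last mask : Nat)
    (seen : PySem.Set (Nat × Nat)) : Bool × PySem.Set (Nat × Nat) :=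
  if mask == full then (true, seen)
  else match fuel with
    | 0 => (false, seen)
    | fuel'+1 => pvDfsLoop adj n full fuel' last mask seen (List.range n)
termination_by (fuel, 0, 0)

def pvDfsLoop (adj : List (List Bool)) (n full : Nat) (fuel last mask : Nat)
    (seen : PySem.Set (Nat × Nat)) (js : List Nat) : Bool × PySem.Set (Nat × Nat) :=
  match js with
  | [] => (false, seen)
  | j :: rest =>
    let bit := 1 <<< j
    if mask &&& bit == 0 &&
       PySem.List.pyGetD (PySem.List.pyGetD adj (last : Int) []) (j : Int) false &&
       !(PySem.Set.contains seen (mask ||| bit, j)) then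
      let seen' := PySem.Set.add seen (mask ||| bit, j)
      match pvDfs adj n full fuel j (mask ||| bit) seen' with
      | (true, seen'') => (true, seen'')
      | (false, seen'') => pvDfsLoop adj n full fuel last mask seen'' rest
    else pvDfsLoop adj n full fuel last mask seen rest
termination_by (fuel, 1, js.length)
end

-- any(dfs(i, 1 << i) for i in range(n)): short-circuit fold threading the shared memo set
def pvAnyDfs (adj : List (List Bool)) (n full : Nat)
    (seen : PySem.Set (Nat × Nat)) : List Nat → Bool
  | [] => false
  | i :: rest =>
    match pvDfs adj n full n i (1 <<< i) seen with
    | (true, _) => true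
    | (false, seen') => pvAnyDfs adj n full seen' rest

def stringsRearrangement_alt (inputArray : List String) : Bool :=
  let n := inputArray.length
  let adj := inputArray.map (fun a => inputArray.map (fun b => pvDiffers a b))
  let full := (1 <<< n) - 1
  pvAnyDfs adj n full PySem.Set.empty (List.range n)

-- ===== PRECONDITION & SPEC =====
def Spec_stringsRearrangement (inputArray : List String) (out : Bool) : Prop := out = stringsRearrangement_alt inputArray
instance (inputArray : List String) (out : Bool) : Decidable (Spec_stringsRearrangement inputArray out) := by unfold Spec_stringsRearrangement; infer_instance

-- ===== CLAIM (what is proved, stated in full; the proofs are below) =====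
def Claim_equal_stringsRearrangement : Prop := ∀ (inputArray : List String), Dom_stringsRearrangement inputArray → Spec_stringsRearrangement inputArray (stringsRearrangement inputArray)


-- ===== LEMMAS AND PROOFS =====

-- proof-side notions (used only by the proofs)
def getS (arr : List String) (i : Nat) : String := arr.getD i ""

def chainStr : List String → Bool
  | [] => true
  | [_] => true
  | a :: b :: t => pvDiffers a b && chainStr (b :: t)

def chainIdx (arr : List String) (p : List Nat) : Bool := chainStr (p.map (getS arr))

def adjB (arr : List String) (i j : Nat) : Bool := pvDiffers (getS arr i) (getS arr j)

def mkAdj (arr : List String) : List (List Bool) :=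
  arr.map (fun a => arr.map (fun b => pvDiffers a b))

-- ExtB arr mask last: from endpoint `last` the chain can be extended through exactly the
-- indices outside `mask`
def ExtB (arr : List String) (mask last : Nat) : Prop :=
  ∃ js : List Nat, js.Nodup ∧ (∀ j ∈ js, j < arr.length ∧ mask.testBit j = false) ∧
    (∀ k, k < arr.length → mask.testBit k = true ∨ k ∈ js) ∧
    chainIdx arr (last :: js) = true

def SubM (a b : Nat) : Prop := ∀ k, a.testBit k = true → b.testBit k = true

def cnt (arr : List String) (mask : Nat) : Nat :=
  ((Finset.range arr.length).filter (fun k => mask.testBit k = true)).card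

-- ---- basic facts ----

theorem countP_range_zip : ∀ (l1 l2 : List Char), l1.length = l2.length →
    (List.range l1.length).countP (fun k => l1.getD k ' ' != l2.getD k ' ') =
      (l1.zip l2).countP (fun p => p.1 != p.2) := by
  intro l1
  induction l1 with
  | nil => intro l2 h; simp
  | cons a l1 ih =>
    intro l2 h
    match l2 with
    | [] => simp at h
    | b :: l2 =>
      have hlen : l1.length = l2.length := by simpa using h
      simp only [List.length_cons, List.range_succ_eq_map, List.countP_cons, List.countP_map,
        List.zip_cons_cons, List.getD_cons_zero]
      have hcomp : ∀ k ∈ List.range l1.length,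
          (((fun k => (a :: l1).getD k ' ' != (b :: l2).getD k ' ') ∘ Nat.succ) k = true ↔
            (fun k => l1.getD k ' ' != l2.getD k ' ') k = true) := by
        intro k hk; simp [Function.comp]
      rw [List.countP_congr hcomp, ih l2 hlen]

theorem pvDiffers_eq (a b : String) : pvDiffersByOne a b = pvDiffers a b := by
  unfold pvDiffersByOne pvDiffers
  rw [PySem.Str.len_eq a, PySem.Str.len_eq b]
  by_cases h : a.toList.length = b.toList.length
  · have hL : a.length = b.length := by simpa using h
    rw [if_neg (by simp [hL])]
    rw [PySem.List.foldl_count_if]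
    have hc : (PySem.List.pyRange 0 (↑a.toList.length) 1).countP
        (fun i => PySem.List.pyGetD a.toList i ' ' != PySem.List.pyGetD b.toList i ' ')
        = (a.toList.zip b.toList).countP (fun p => p.1 != p.2) := by
      rw [PySem.List.pyRange_zero_natCast, ← countP_range_zip a.toList b.toList h]
      rw [List.countP_map]
      apply List.countP_congr
      intro k hk
      simp [Function.comp]
    rw [hc, h]
    simp
  · have hL : ¬ a.length = b.length := by simpa using h
    rw [if_pos (by simp [hL])]
    have hbe : ((a.toList.length : Int) == (b.toList.length : Int)) = false := by simp [hL]
    rw [hbe, Bool.false_and]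

theorem chainStr_cons_cons (a b : String) (t : List String) :
    chainStr (a :: b :: t) = (pvDiffers a b && chainStr (b :: t)) := rfl

theorem chainIdx_cons_cons (arr : List String) (i j : Nat) (rest : List Nat) :
    chainIdx arr (i :: j :: rest) = (adjB arr i j && chainIdx arr (j :: rest)) := by
  rfl

theorem map_getS_range (arr : List String) :
    (List.range arr.length).map (getS arr) = arr := by
  apply List.ext_getElem
  · simp
  · intro i h1 h2
    simp only [List.getElem_map, List.getElem_range, getS]
    exact List.getD_eq_getElem arr "" h2

theorem perm_map_lift {α β : Type} [BEq β] [LawfulBEq β] (f : α → β) :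
    ∀ (l : List β) (s : List α), l.Perm (s.map f) → ∃ t : List α, t.Perm s ∧ l = t.map f := by
  intro l
  induction l with
  | nil =>
    intro s h
    have hs : s.map f = [] := h.symm.eq_nil
    exact ⟨[], by simp [List.map_eq_nil_iff.mp hs], rfl⟩
  | cons x l ih =>
    intro s h
    have hx : x ∈ s.map f := h.subset (by simp)
    have hk : List.idxOf x (s.map f) < (s.map f).length := List.idxOf_lt_length_of_mem hx
    have hks : List.idxOf x (s.map f) < s.length := by simpa using hk
    have hsk : f s[List.idxOf x (s.map f)] = x := by
      have h3 := List.getElem_idxOf hk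
      simp only [List.getElem_map] at h3
      exact h3
    have hperm : l.Perm ((s.map f).eraseIdx (List.idxOf x (s.map f))) := by
      have h2 := (List.cons_perm_iff_perm_erase.mp h).2
      rwa [List.erase_eq_eraseIdx_of_idxOf rfl] at h2
    rw [List.eraseIdx_map] at hperm
    obtain ⟨t', ht'p, ht'e⟩ := ih _ hperm
    refine ⟨s[List.idxOf x (s.map f)] :: t', ?_, ?_⟩
    · exact (ht'p.cons _).trans (List.getElem_cons_eraseIdx_perm hks)
    · simp [← ht'e, hsk]

theorem cnt_le (arr : List String) (mask : Nat) : cnt arr mask ≤ arr.length := by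
  unfold cnt
  calc ((Finset.range arr.length).filter (fun k => mask.testBit k = true)).card
      ≤ (Finset.range arr.length).card := Finset.card_filter_le _ _
    _ = arr.length := Finset.card_range _

theorem cnt_or_two_pow (arr : List String) (mask j : Nat) (hj : j < arr.length)
    (hb : mask.testBit j = false) : cnt arr (mask ||| 2 ^ j) = cnt arr mask + 1 := by
  unfold cnt
  have hset : (Finset.range arr.length).filter (fun k => (mask ||| 2 ^ j).testBit k = true)
      = insert j ((Finset.range arr.length).filter (fun k => mask.testBit k = true)) := by
    ext k
    simp only [Finset.mem_filter, Finset.mem_insert, Finset.mem_range, Nat.testBit_or,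
      Nat.testBit_two_pow, Bool.or_eq_true, decide_eq_true_eq]
    constructor
    · rintro ⟨hk, h | h⟩
      · exact Or.inr ⟨hk, h⟩
      · exact Or.inl h.symm
    · rintro (h | ⟨hk, h⟩)
      · exact ⟨h ▸ hj, Or.inr h.symm⟩
      · exact ⟨hk, Or.inl h⟩
  rw [hset, Finset.card_insert_of_notMem (by simp [hb])]

theorem cnt_two_pow_pos (arr : List String) (i : Nat) (hi : i < arr.length) :
    0 < cnt arr (2 ^ i) := by
  unfold cnt
  apply Finset.card_pos.mpr
  exact ⟨i, by simp [hi, Nat.testBit_two_pow_self]⟩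

theorem adj_get (arr : List String) (last j : Nat) (hl : last < arr.length)
    (hj : j < arr.length) :
    ((mkAdj arr).getD last []).getD j false = adjB arr last j := by
  unfold mkAdj adjB getS
  have h1 : last < (arr.map (fun a => arr.map (fun b => pvDiffers a b))).length := by simpa using hl
  rw [List.getD_eq_getElem _ _ h1, List.getElem_map]
  have h2 : j < (arr.map (fun b => pvDiffers arr[last] b)).length := by simpa using hj
  rw [List.getD_eq_getElem _ _ h2, List.getElem_map]
  rw [List.getD_eq_getElem arr "" hl, List.getD_eq_getElem arr "" hj]

-- ---- the A side: backtracking over shrinking sublists = "a chain permutation exists" ----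

theorem chainA (fuel : Nat) :
    ∀ (array : List String) (s : Int), array.length ≤ fuel → 0 ≤ s →
      s < (array.length : Int) →
      (pvIsChainPossible fuel s array = true ↔
        ∃ l : List String, l.Perm (array.eraseIdx s.toNat) ∧
          chainStr (array.getD s.toNat "" :: l) = true) := by
  induction fuel with
  | zero =>
    intro array s hle h0 hlt
    exfalso
    have hz : array.length = 0 := Nat.le_zero.mp hle
    rw [hz] at hlt
    simp at hlt
    omega
  | succ fuel ih =>
    intro array s hle h0 hlt
    have hk : s.toNat < array.length := by omega
    unfold pvIsChainPossible
    rw [PySem.List.len_eq]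
    by_cases h1 : array.length = 1
    · obtain ⟨x, rfl⟩ := List.length_eq_one_iff.mp h1
      have hs0 : s = 0 := by
        simp only [List.length_cons, List.length_nil] at hlt
        omega
      subst hs0
      rw [if_pos (by simp)]
      constructor
      · intro _
        exact ⟨[], by simp, rfl⟩
      · intro _; rfl
    · have hna : (array.eraseIdx s.toNat).length = array.length - 1 := by
        rw [List.length_eraseIdx]; simp [hk]
      have hlen2 : 2 ≤ array.length := by omega
      rw [if_neg (by simp; omega)]
      have hNA : PySem.List.slice array none (some s) ++ PySem.List.slice array (some (1 + s)) none
          = array.eraseIdx s.toNat := by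
        rw [PySem.List.slice_to array h0, PySem.List.slice_from array (by omega : (0:Int) ≤ 1 + s)]
        rw [List.eraseIdx_eq_take_drop_succ]
        congr 1
        congr 1
        omega
      simp only [hNA, List.any_eq_true]
      have hA : PySem.List.pyGetD array s "" = array.getD s.toNat "" := by
        rw [PySem.List.pyGetD_eq_getElem array "" h0 hlt, List.getD_eq_getElem array "" hk]
      constructor
      · rintro ⟨i, hmem, hf⟩
        rw [PySem.List.mem_pyRange_one] at hmem
        obtain ⟨hi0, hilt⟩ := hmem
        rw [PySem.List.len_eq] at hilt
        rw [Bool.and_eq_true] at hf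
        obtain ⟨hdif, hrec⟩ := hf
        have hik : i.toNat < (array.eraseIdx s.toNat).length := by omega
        have hB : PySem.List.pyGetD (array.eraseIdx s.toNat) i ""
            = (array.eraseIdx s.toNat).getD i.toNat "" := by
          rw [PySem.List.pyGetD_eq_getElem _ "" hi0 hilt, List.getD_eq_getElem _ "" hik]
        rw [hA, hB] at hdif
        rw [ih (array.eraseIdx s.toNat) i (by omega) hi0 (by exact_mod_cast hilt)] at hrec
        obtain ⟨l', hl'p, hl'c⟩ := hrec
        refine ⟨(array.eraseIdx s.toNat).getD i.toNat "" :: l', ?_, ?_⟩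
        · rw [List.getD_eq_getElem _ "" hik]
          exact (hl'p.cons _).trans (List.getElem_cons_eraseIdx_perm hik)
        · show (pvDiffers _ _ && chainStr _) = true
          rw [Bool.and_eq_true]
          exact ⟨by rw [← pvDiffers_eq]; exact hdif, hl'c⟩
      · rintro ⟨l, hlp, hlc⟩
        have hnane : array.eraseIdx s.toNat ≠ [] := by
          intro hcon; rw [hcon] at hna; simp at hna; omega
        have hlne : l ≠ [] := by
          intro hcon; subst hcon
          exact hnane (hlp.nil_eq).symm
        obtain ⟨h0', t, rfl⟩ := List.exists_cons_of_ne_nil hlne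
        have hmem : h0' ∈ array.eraseIdx s.toNat := hlp.subset (by simp)
        have hik : List.idxOf h0' (array.eraseIdx s.toNat) < (array.eraseIdx s.toNat).length :=
          List.idxOf_lt_length_of_mem hmem
        have hgd : (array.eraseIdx s.toNat).getD (List.idxOf h0' (array.eraseIdx s.toNat)) "" = h0' := by
          rw [List.getD_eq_getElem _ "" hik]; exact List.getElem_idxOf hik
        have htperm : t.Perm ((array.eraseIdx s.toNat).eraseIdx
            (List.idxOf h0' (array.eraseIdx s.toNat))) := by
          have h2 := (List.cons_perm_iff_perm_erase.mp hlp).2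
          rwa [List.erase_eq_eraseIdx_of_idxOf rfl] at h2
        rw [chainStr_cons_cons, Bool.and_eq_true] at hlc
        obtain ⟨hd, hct⟩ := hlc
        refine ⟨(List.idxOf h0' (array.eraseIdx s.toNat) : Int), ?_, ?_⟩
        · rw [PySem.List.mem_pyRange_one, PySem.List.len_eq]
          constructor
          · exact Int.natCast_nonneg _
          · exact_mod_cast hik
        · rw [Bool.and_eq_true]
          constructor
          · have hB : PySem.List.pyGetD (array.eraseIdx s.toNat)
                (List.idxOf h0' (array.eraseIdx s.toNat) : Int) ""
                = (array.eraseIdx s.toNat).getD (List.idxOf h0' (array.eraseIdx s.toNat)) "" := by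
              rw [PySem.List.pyGetD_eq_getElem _ "" (Int.natCast_nonneg _) (by exact_mod_cast hik),
                List.getD_eq_getElem _ "" (by simpa using hik)]
              simp
            rw [hA, hB, hgd, pvDiffers_eq]
            exact hd
          · rw [ih (array.eraseIdx s.toNat) _ (by omega) (Int.natCast_nonneg _)
              (by exact_mod_cast hik)]
            refine ⟨t, ?_, ?_⟩
            · simpa using htperm
            · rw [Int.toNat_natCast, hgd]
              exact hct

theorem A_iff (arr : List String) :
    stringsRearrangement arr = true ↔
      ∃ l : List String, l.Perm arr ∧ l ≠ [] ∧ chainStr l = true := by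
  unfold stringsRearrangement
  rw [PySem.List.len_eq, List.any_eq_true]
  constructor
  · rintro ⟨sI, hmem, hs⟩
    rw [PySem.List.mem_pyRange_one] at hmem
    obtain ⟨h0, hlt⟩ := hmem
    have hk : sI.toNat < arr.length := by omega
    rw [chainA arr.length arr sI (le_refl _) h0 hlt] at hs
    obtain ⟨l, hp, hc⟩ := hs
    refine ⟨arr.getD sI.toNat "" :: l, ?_, by simp, hc⟩
    rw [List.getD_eq_getElem arr "" hk]
    exact (hp.cons _).trans (List.getElem_cons_eraseIdx_perm hk)
  · rintro ⟨l, hlp, hlne, hlc⟩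
    obtain ⟨h0', t, rfl⟩ := List.exists_cons_of_ne_nil hlne
    have hmem : h0' ∈ arr := hlp.subset (by simp)
    have hik : List.idxOf h0' arr < arr.length := List.idxOf_lt_length_of_mem hmem
    have hgd : arr.getD (List.idxOf h0' arr) "" = h0' := by
      rw [List.getD_eq_getElem _ "" hik]; exact List.getElem_idxOf hik
    have htperm : t.Perm (arr.eraseIdx (List.idxOf h0' arr)) := by
      have h2 := (List.cons_perm_iff_perm_erase.mp hlp).2
      rwa [List.erase_eq_eraseIdx_of_idxOf rfl] at h2
    refine ⟨(List.idxOf h0' arr : Int), ?_, ?_⟩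
    · rw [PySem.List.mem_pyRange_one]
      exact ⟨Int.natCast_nonneg _, by exact_mod_cast hik⟩
    · rw [chainA arr.length arr _ (le_refl _) (Int.natCast_nonneg _) (by exact_mod_cast hik)]
      refine ⟨t, ?_, ?_⟩
      · simpa using htperm
      · rw [Int.toNat_natCast, hgd]
        exact hlc

-- ---- the B side: memoized bitmask DFS = "a chain permutation exists" ----

theorem subm_or_left (mask b : Nat) : SubM mask (mask ||| b) := by
  intro k h; simp [Nat.testBit_or, h]

theorem subm_trans {a b c : Nat} (h1 : SubM a b) (h2 : SubM b c) : SubM a c :=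
  fun k hk => h2 k (h1 k hk)

theorem or_two_pow_ne (mask j : Nat) (h : mask.testBit j = false) : mask ||| 2 ^ j ≠ mask := by
  intro he
  have h2 := congrArg (fun m => Nat.testBit m j) he
  simp [Nat.testBit_or, Nat.testBit_two_pow_self, h] at h2

theorem ne_of_subm_or (mask j : Nat) (m : Nat) (h : mask.testBit j = false)
    (hs : SubM (mask ||| 2 ^ j) m) : m ≠ mask := by
  intro he
  have h2 := hs j (by simp [Nat.testBit_or, Nat.testBit_two_pow_self])
  rw [he] at h2
  rw [h2] at h
  exact absurd h (by simp)

theorem and_shift_eq_zero_iff (mask j : Nat) :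
    ((mask &&& (1 <<< j)) == 0) = true ↔ mask.testBit j = false := by
  rw [Nat.one_shiftLeft, Nat.and_two_pow]
  cases h : mask.testBit j <;> simp [h, beq_iff_eq, Nat.pow_eq_zero]

theorem ext_of_full (arr : List String) (last : Nat) :
    ExtB arr ((1 <<< arr.length) - 1) last := by
  refine ⟨[], List.nodup_nil, by simp, ?_, rfl⟩
  intro k hk
  left
  rw [Nat.one_shiftLeft, Nat.testBit_two_pow_sub_one]
  simpa using hk

theorem full_of_cover (arr : List String) (mask : Nat)
    (Hmask : ∀ k, mask.testBit k = true → k < arr.length)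
    (cover : ∀ k, k < arr.length → mask.testBit k = true) :
    mask = (1 <<< arr.length) - 1 := by
  rw [Nat.one_shiftLeft]
  apply Nat.eq_of_testBit_eq
  intro k
  rw [Nat.testBit_two_pow_sub_one]
  by_cases hk : k < arr.length
  · simp [hk, cover k hk]
  · simp only [hk, decide_false]
    cases hb : mask.testBit k
    · rfl
    · exact absurd (Hmask k hb) hk

theorem ext_elim (arr : List String) (mask last : Nat)
    (Hmask : ∀ k, mask.testBit k = true → k < arr.length)
    (hfull : mask ≠ (1 <<< arr.length) - 1)
    (hext : ExtB arr mask last) :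
    ∃ j, j < arr.length ∧ mask.testBit j = false ∧ adjB arr last j = true ∧
      ExtB arr (mask ||| 2 ^ j) j := by
  obtain ⟨js, hnd, hfree, hcover, hchain⟩ := hext
  match js, hnd, hfree, hcover, hchain with
  | [], _, _, hcover, _ =>
    exact absurd (full_of_cover arr mask Hmask (fun k hk => (hcover k hk).resolve_right
      (by simp))) hfull
  | j :: rest, hnd, hfree, hcover, hchain =>
    have hj := hfree j (by simp)
    rw [chainIdx_cons_cons, Bool.and_eq_true] at hchain
    refine ⟨j, hj.1, hj.2, hchain.1, rest, hnd.of_cons, ?_, ?_, hchain.2⟩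
    · intro k hk
      have h2 := hfree k (by simp [hk])
      refine ⟨h2.1, ?_⟩
      have hkj : k ≠ j := by rintro rfl; exact (List.nodup_cons.mp hnd).1 hk
      simp [Nat.testBit_or, h2.2, Nat.testBit_two_pow, hkj, Ne.symm hkj]
    · intro k hk
      rcases hcover k hk with h | h
      · exact Or.inl (by simp [Nat.testBit_or, h])
      · rcases List.mem_cons.mp h with rfl | h
        · exact Or.inl (by simp [Nat.testBit_or, Nat.testBit_two_pow_self])
        · exact Or.inr h

theorem ext_intro (arr : List String) (mask last j : Nat)
    (hj : j < arr.length) (hfree : mask.testBit j = false)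
    (hadj : adjB arr last j = true) (h : ExtB arr (mask ||| 2 ^ j) j) :
    ExtB arr mask last := by
  obtain ⟨js, hnd, hfreeJ, hcover, hchain⟩ := h
  have hjnot : j ∉ js := by
    intro hmem
    have h2 := (hfreeJ j hmem).2
    simp [Nat.testBit_or, Nat.testBit_two_pow_self] at h2
  refine ⟨j :: js, List.nodup_cons.mpr ⟨hjnot, hnd⟩, ?_, ?_, ?_⟩
  · intro k hk
    rcases List.mem_cons.mp hk with rfl | hk
    · exact ⟨hj, hfree⟩
    · have h2 := hfreeJ k hk
      refine ⟨h2.1, ?_⟩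
      have := h2.2
      simp [Nat.testBit_or] at this
      exact this.1
  · intro k hk
    rcases hcover k hk with h2 | h2
    · simp only [Nat.testBit_or, Bool.or_eq_true, Nat.testBit_two_pow] at h2
      rcases h2 with h2 | h2
      · exact Or.inl h2
      · exact Or.inr (by simp [List.mem_cons, (by simpa using h2 : j = k).symm])
    · exact Or.inr (by simp [hk, h2])
  · rw [chainIdx_cons_cons, Bool.and_eq_true]
    exact ⟨hadj, hchain⟩

def DfsOk (arr : List String) (fuel last mask : Nat) (seen : PySem.Set (Nat × Nat)) : Prop :=
  ((pvDfs (mkAdj arr) arr.length ((1 <<< arr.length) - 1) fuel last mask seen).1 = true →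
      ExtB arr mask last) ∧
  ((pvDfs (mkAdj arr) arr.length ((1 <<< arr.length) - 1) fuel last mask seen).1 = false →
      ¬ ExtB arr mask last ∧
      (∀ m x, (m, x) ∈ (pvDfs (mkAdj arr) arr.length ((1 <<< arr.length) - 1) fuel last mask seen).2 →
        (m, x) ∈ seen ∨ (SubM mask m ∧ m ≠ mask)) ∧
      (∀ m x, (m, x) ∈ (pvDfs (mkAdj arr) arr.length ((1 <<< arr.length) - 1) fuel last mask seen).2 →
        SubM mask m → m ≠ mask → ¬ ExtB arr m x))

theorem loop_main (arr : List String) (fuel : Nat)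
    (IH : ∀ last mask seen, last < arr.length → arr.length < fuel + cnt arr mask →
      (∀ k, mask.testBit k = true → k < arr.length) →
      (∀ m x, (m, x) ∈ seen → SubM mask m → m ≠ mask → ¬ ExtB arr m x) →
      DfsOk arr fuel last mask seen) :
    ∀ (js : List Nat) (last mask : Nat) (seen : PySem.Set (Nat × Nat)),
      last < arr.length → (∀ j ∈ js, j < arr.length) →
      arr.length < (fuel + 1) + cnt arr mask →
      (∀ k, mask.testBit k = true → k < arr.length) →
      (∀ m x, (m, x) ∈ seen → SubM mask m → m ≠ mask → ¬ ExtB arr m x) →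
      (((pvDfsLoop (mkAdj arr) arr.length ((1 <<< arr.length) - 1) fuel last mask seen js).1 = true →
          ExtB arr mask last) ∧
       ((pvDfsLoop (mkAdj arr) arr.length ((1 <<< arr.length) - 1) fuel last mask seen js).1 = false →
          (∀ j ∈ js, mask.testBit j = false → adjB arr last j = true →
            ¬ ExtB arr (mask ||| 2 ^ j) j) ∧
          (∀ m x, (m, x) ∈ (pvDfsLoop (mkAdj arr) arr.length ((1 <<< arr.length) - 1) fuel last mask seen js).2 →
            (m, x) ∈ seen ∨ (SubM mask m ∧ m ≠ mask)) ∧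
          (∀ m x, (m, x) ∈ (pvDfsLoop (mkAdj arr) arr.length ((1 <<< arr.length) - 1) fuel last mask seen js).2 →
            SubM mask m → m ≠ mask → ¬ ExtB arr m x))) := by
  intro js
  induction js with
  | nil =>
    intro last mask seen hlast hjs hfuel Hmask Hseen
    rw [pvDfsLoop]
    exact ⟨by simp, fun _ => ⟨by simp, fun m x hm => Or.inl hm, fun m x hm => Hseen m x hm⟩⟩
  | cons j rest ihjs =>
    intro last mask seen hlast hjs hfuel Hmask Hseen
    have hjn : j < arr.length := hjs j (by simp)
    rw [pvDfsLoop]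
    by_cases hfree : mask.testBit j = false
    case neg =>
      rw [if_neg (by
        simp only [Bool.and_eq_true, Bool.not_eq_true']
        rintro ⟨⟨h1, _⟩, _⟩
        exact hfree ((and_shift_eq_zero_iff mask j).mp h1))]
      obtain ⟨hT, hF⟩ := ihjs last mask seen hlast (fun x hx => hjs x (by simp [hx])) hfuel Hmask Hseen
      refine ⟨hT, fun hf => ?_⟩
      obtain ⟨hperj, hprov, hbad⟩ := hF hf
      exact ⟨fun x hx hxf hxa => by
        rcases List.mem_cons.mp hx with rfl | hx
        · exact absurd hxf hfree
        · exact hperj x hx hxf hxa, hprov, hbad⟩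
    case pos =>
    have hadjeq : PySem.List.pyGetD (PySem.List.pyGetD (mkAdj arr) (last : Int) []) (j : Int) false
        = adjB arr last j := by
      rw [PySem.List.pyGetD_natCast, PySem.List.pyGetD_natCast]
      exact adj_get arr last j hlast hjn
    by_cases hadj : adjB arr last j = true
    case neg =>
      rw [if_neg (by
        simp only [Bool.and_eq_true, Bool.not_eq_true']
        rintro ⟨⟨_, h2⟩, _⟩
        rw [hadjeq] at h2
        exact hadj h2)]
      obtain ⟨hT, hF⟩ := ihjs last mask seen hlast (fun x hx => hjs x (by simp [hx])) hfuel Hmask Hseen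
      refine ⟨hT, fun hf => ?_⟩
      obtain ⟨hperj, hprov, hbad⟩ := hF hf
      exact ⟨fun x hx hxf hxa => by
        rcases List.mem_cons.mp hx with rfl | hx
        · exact absurd hxa hadj
        · exact hperj x hx hxf hxa, hprov, hbad⟩
    case pos =>
    have hbit : (1 : Nat) <<< j = 2 ^ j := Nat.one_shiftLeft j
    by_cases hseen : (mask ||| 2 ^ j, j) ∈ seen
    case pos =>
      rw [if_neg (by
        simp only [Bool.and_eq_true, Bool.not_eq_true']
        rintro ⟨_, h3⟩
        rw [hbit, (PySem.Set.contains_iff seen _).mpr hseen] at h3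
        simp at h3)]
      obtain ⟨hT, hF⟩ := ihjs last mask seen hlast (fun x hx => hjs x (by simp [hx])) hfuel Hmask Hseen
      refine ⟨hT, fun hf => ?_⟩
      obtain ⟨hperj, hprov, hbad⟩ := hF hf
      refine ⟨fun x hx hxf hxa => ?_, hprov, hbad⟩
      rcases List.mem_cons.mp hx with rfl | hx
      · exact Hseen _ _ hseen (subm_or_left mask (2 ^ x)) (or_two_pow_ne mask x hxf)
      · exact hperj x hx hxf hxa
    case neg =>
      rw [if_pos (by
        rw [Bool.and_eq_true, Bool.and_eq_true]
        refine ⟨⟨(and_shift_eq_zero_iff mask j).mpr hfree, by rw [hadjeq]; exact hadj⟩, ?_⟩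
        rw [hbit, Bool.not_eq_true']
        rw [← Bool.not_eq_true, PySem.Set.contains_iff]
        exact hseen)]
      -- hypotheses for the recursive dfs call on (j, mask ||| 2^j) with seen + the new state
      have hMask' : ∀ k, (mask ||| 2 ^ j).testBit k = true → k < arr.length := by
        intro k hk
        simp only [Nat.testBit_or, Bool.or_eq_true, Nat.testBit_two_pow] at hk
        rcases hk with hk | hk
        · exact Hmask k hk
        · rwa [← (by simpa using hk : j = k)]
      have hfuel' : arr.length < fuel + cnt arr (mask ||| 2 ^ j) := by
        rw [cnt_or_two_pow arr mask j hjn hfree]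
        omega
      have hseen' : ∀ m x, (m, x) ∈ PySem.Set.add seen (mask ||| 2 ^ j, j) →
          SubM (mask ||| 2 ^ j) m → m ≠ mask ||| 2 ^ j → ¬ ExtB arr m x := by
        intro m x hm hsub hne
        rcases (PySem.Set.mem_add seen _ _).mp hm with hm | hm
        · exact Hseen m x hm (subm_trans (subm_or_left mask (2 ^ j)) hsub)
            (ne_of_subm_or mask j m hfree hsub)
        · injection hm with e1 e2
          exact absurd e1 hne
      obtain ⟨hdT, hdF⟩ := IH j (mask ||| 2 ^ j) (PySem.Set.add seen (mask ||| 2 ^ j, j))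
        hjn hfuel' hMask' hseen'
      rw [hbit]
      rcases hr : pvDfs (mkAdj arr) arr.length ((1 <<< arr.length) - 1) fuel j (mask ||| 2 ^ j)
          (PySem.Set.add seen (mask ||| 2 ^ j, j)) with ⟨b, seen2⟩
      simp only [hr]
      cases b
      case true =>
        have hext := hdT (by rw [hr])
        refine ⟨fun _ => ext_intro arr mask last j hjn hfree hadj hext, fun hf => ?_⟩
        simp at hf
      case false =>
        obtain ⟨hnext, hprov2, hbad2⟩ := hdF (by rw [hr])
        rw [hr] at hprov2 hbad2
        simp only at hprov2 hbad2
        -- hypotheses for continuing the loop on rest with seen2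
        have hseen2 : ∀ m x, (m, x) ∈ seen2 → SubM mask m → m ≠ mask → ¬ ExtB arr m x := by
          intro m x hm hsub hne
          rcases hprov2 m x hm with hm2 | hm2
          · rcases (PySem.Set.mem_add seen _ _).mp hm2 with hm3 | hm3
            · exact Hseen m x hm3 hsub hne
            · injection hm3 with e1 e2
              subst e1; subst e2
              exact hnext
          · exact hbad2 m x hm hm2.1 hm2.2
        obtain ⟨hT, hF⟩ := ihjs last mask seen2 hlast (fun x hx => hjs x (by simp [hx]))
          hfuel Hmask hseen2
        refine ⟨hT, fun hf => ?_⟩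
        obtain ⟨hperj, hprov, hbad⟩ := hF hf
        refine ⟨fun x hx hxf hxa => ?_, fun m x hm => ?_, hbad⟩
        · rcases List.mem_cons.mp hx with rfl | hx
          · exact hnext
          · exact hperj x hx hxf hxa
        · rcases hprov m x hm with hm2 | hm2
          · rcases hprov2 m x hm2 with hm3 | hm3
            · rcases (PySem.Set.mem_add seen _ _).mp hm3 with hm4 | hm4
              · exact Or.inl hm4
              · injection hm4 with e1 e2
                subst e1
                exact Or.inr ⟨subm_or_left mask (2 ^ j), or_two_pow_ne mask j hfree⟩
            · exact Or.inr ⟨subm_trans (subm_or_left mask (2 ^ j)) hm3.1,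
                ne_of_subm_or mask j m hfree hm3.1⟩
          · exact Or.inr hm2

theorem dfs_main (arr : List String) : ∀ (fuel last mask : Nat)
    (seen : PySem.Set (Nat × Nat)), last < arr.length →
    arr.length < fuel + cnt arr mask →
    (∀ k, mask.testBit k = true → k < arr.length) →
    (∀ m x, (m, x) ∈ seen → SubM mask m → m ≠ mask → ¬ ExtB arr m x) →
    DfsOk arr fuel last mask seen := by
  intro fuel
  induction fuel with
  | zero =>
    intro last mask seen hlast hfuel Hmask Hseen
    have hc := cnt_le arr mask
    omega
  | succ fuel IH =>
    intro last mask seen hlast hfuel Hmask Hseen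
    unfold DfsOk
    rw [pvDfs]
    by_cases hfull : mask = (1 <<< arr.length) - 1
    · rw [if_pos (by simp [hfull])]
      exact ⟨fun _ => hfull ▸ ext_of_full arr last, fun hf => by simp at hf⟩
    · rw [if_neg (by simp [hfull])]
      obtain ⟨hT, hF⟩ := loop_main arr fuel (fun l m sn hl hf hm hs => IH l m sn hl hf hm hs)
        (List.range arr.length) last mask seen hlast (by simp) hfuel Hmask Hseen
      refine ⟨hT, fun hf => ?_⟩
      obtain ⟨hperj, hprov, hbad⟩ := hF hf
      refine ⟨fun hext => ?_, hprov, hbad⟩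
      obtain ⟨j, hjn, hjf, hja, hje⟩ := ext_elim arr mask last Hmask hfull hext
      exact hperj j (by simpa using hjn) hjf hja hje

theorem anyDfs_main (arr : List String) : ∀ (is : List Nat) (seen : PySem.Set (Nat × Nat)),
    (∀ i ∈ is, i < arr.length) →
    (∀ m x, (m, x) ∈ seen → ¬ ExtB arr m x) →
    (pvAnyDfs (mkAdj arr) arr.length ((1 <<< arr.length) - 1) seen is = true ↔
      ∃ i ∈ is, ExtB arr (1 <<< i) i) := by
  intro is
  induction is with
  | nil => intro seen _ _; rw [pvAnyDfs]; simp
  | cons i rest ih =>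
    intro seen his hseen
    have hin : i < arr.length := his i (by simp)
    have hfuel : arr.length < arr.length + cnt arr (2 ^ i) := by
      have := cnt_two_pow_pos arr i hin
      omega
    have hMask : ∀ k, (2 ^ i).testBit k = true → k < arr.length := by
      intro k hk
      rw [Nat.testBit_two_pow] at hk
      rwa [← (by simpa using hk : i = k)]
    have hSeen : ∀ m x, (m, x) ∈ seen → SubM (2 ^ i) m → m ≠ 2 ^ i → ¬ ExtB arr m x :=
      fun m x hm _ _ => hseen m x hm
    obtain ⟨hdT, hdF⟩ := dfs_main arr arr.length i (2 ^ i) seen hin hfuel hMask hSeen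
    rw [pvAnyDfs, Nat.one_shiftLeft i]
    rcases hr : pvDfs (mkAdj arr) arr.length ((1 <<< arr.length) - 1) arr.length i
        (2 ^ i) seen with ⟨b, seen2⟩
    cases b
    case true =>
      constructor
      · intro _
        exact ⟨i, by simp, by rw [Nat.one_shiftLeft]; exact hdT (by rw [hr])⟩
      · intro _; rfl
    case false =>
      obtain ⟨hnext, hprov2, hbad2⟩ := hdF (by rw [hr])
      rw [hr] at hprov2 hbad2
      have hseen2 : ∀ m x, (m, x) ∈ seen2 → ¬ ExtB arr m x := by
        intro m x hm
        rcases hprov2 m x hm with hm2 | hm2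
        · exact hseen m x hm2
        · exact hbad2 m x hm hm2.1 hm2.2
      rw [ih seen2 (fun x hx => his x (by simp [hx])) hseen2]
      constructor
      · rintro ⟨x, hx, hext⟩
        exact ⟨x, by simp [hx], hext⟩
      · rintro ⟨x, hx, hext⟩
        rcases List.mem_cons.mp hx with rfl | hx
        · rw [Nat.one_shiftLeft] at hext
          exact absurd hext hnext
        · exact ⟨x, hx, hext⟩

theorem B_iff (arr : List String) :
    stringsRearrangement_alt arr = true ↔
      ∃ p : List Nat, p.Perm (List.range arr.length) ∧ p ≠ [] ∧ chainIdx arr p = true := by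
  have h1 : ∀ i ∈ List.range arr.length, i < arr.length := by simp
  have h2 : ∀ (m x : Nat), (m, x) ∈ (PySem.Set.empty : PySem.Set (Nat × Nat)) → ¬ ExtB arr m x := by
    intro m x hm; simp [PySem.Set.empty] at hm
  have hB : stringsRearrangement_alt arr
      = pvAnyDfs (mkAdj arr) arr.length ((1 <<< arr.length) - 1) PySem.Set.empty
          (List.range arr.length) := rfl
  rw [hB, anyDfs_main arr (List.range arr.length) PySem.Set.empty h1 h2]
  constructor
  · rintro ⟨i, hi, js, hnd, hfree, hcover, hchain⟩
    rw [List.mem_range] at hi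
    rw [Nat.one_shiftLeft] at hfree hcover
    refine ⟨i :: js, ?_, by simp, hchain⟩
    rw [List.perm_ext_iff_of_nodup ?_ (List.nodup_range)]
    · intro k
      simp only [List.mem_cons, List.mem_range]
      constructor
      · rintro (rfl | hk)
        · exact hi
        · exact (hfree k hk).1
      · intro hk
        rcases hcover k hk with h | h
        · rw [Nat.testBit_two_pow] at h
          have hik : i = k := by simpa using h
          exact Or.inl hik.symm
        · exact Or.inr h
    · refine List.nodup_cons.mpr ⟨?_, hnd⟩
      intro hmem
      have h2 := (hfree i hmem).2
      simp [Nat.testBit_two_pow_self] at h2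
  · rintro ⟨p, hp, hne, hchain⟩
    obtain ⟨i, js, rfl⟩ := List.exists_cons_of_ne_nil hne
    have hnd : (i :: js).Nodup := hp.nodup_iff.mpr List.nodup_range
    have hmem : ∀ k, k ∈ i :: js ↔ k < arr.length := by
      intro k
      rw [← List.mem_range]
      exact (List.perm_ext_iff_of_nodup hnd List.nodup_range).mp hp k
    have hi : i < arr.length := (hmem i).mp (by simp)
    refine ⟨i, by simpa using hi, js, (List.nodup_cons.mp hnd).2, ?_, ?_, hchain⟩
    · intro j hj
      refine ⟨(hmem j).mp (by simp [hj]), ?_⟩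
      rw [Nat.one_shiftLeft, Nat.testBit_two_pow]
      have : i ≠ j := by rintro rfl; exact (List.nodup_cons.mp hnd).1 hj
      simp [this]
    · intro k hk
      rcases List.mem_cons.mp ((hmem k).mpr hk) with rfl | h
      · exact Or.inl (by rw [Nat.one_shiftLeft]; exact Nat.testBit_two_pow_self)
      · exact Or.inr h

-- ---- bridge ----

theorem idx_str_bridge (arr : List String) :
    (∃ p : List Nat, p.Perm (List.range arr.length) ∧ p ≠ [] ∧ chainIdx arr p = true) ↔
      (∃ l : List String, l.Perm arr ∧ l ≠ [] ∧ chainStr l = true) := by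
  constructor
  · rintro ⟨p, hp, hne, hc⟩
    refine ⟨p.map (getS arr), ?_, by simpa using hne, hc⟩
    have h2 := hp.map (getS arr)
    rwa [map_getS_range] at h2
  · rintro ⟨l, hl, hne, hc⟩
    have hl' : l.Perm ((List.range arr.length).map (getS arr)) := by rwa [map_getS_range]
    obtain ⟨p, hp, he⟩ := perm_map_lift (getS arr) l _ hl'
    refine ⟨p, hp, ?_, ?_⟩
    · rintro rfl; simp at he; exact hne he
    · unfold chainIdx; rw [← he]; exact hc

-- ===== VERDICT (by name: the statement is the Claim_ definition above) =====
theorem stringsRearrangement_spec : Claim_equal_stringsRearrangement := by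
  intro arr _
  unfold Spec_stringsRearrangement
  rw [Bool.eq_iff_iff, A_iff arr, B_iff arr, idx_str_bridge arr]
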